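-- pv_equiv track=rewrite | github.com/saliou7/Alignement-des-sequences-adn | 5_Barry_Brisset/align_sequence.py | coupure
-- ===== SOURCE A (Python) =====
-- c_del = 2 #cout de suppression
--
-- c_ins = 2 #cout d'insertion
--
-- def cout_sub(a, b):
--     if a == b:
--         return 0
--     if (a == 'A' and b == 'T') or (a == 'T' and b == 'A') or (a == 'G' and b == 'C') or (a == 'C' and b == 'G') :
--         return 3
--     return 4
--
-- def coupure(x, y):
--     """
--     :param x: Un mot
--     :param y: Un mot
--     :return: le rang de la lettre a laquelle on doit couper y.
--     """
--     n = len(x)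
--     m = len(y)
--
--     T = [[], []]  # Stock les distances
--     col = [[], []]  # Stock la colonne d'origine sur la ligne i
--
--     for j in range(0, m + 1):
--         (T[0]).append(j * c_ins)  # Initialisation
--         (T[1]).append(-1)  # Remplissage
--
--         (col[0]).append(j)  # Initialisation
--         (col[1]).append(-1)  # Remplissage
--
--     for i in range(1, n // 2 + 1):
--         T[1][0] = i * c_del
--         for j in range(1, m + 1):
--             T[1][j] = min([T[1][j - 1] + c_ins,
--                            T[0][j] + c_del,
--                            T[0][j - 1] + cout_sub(x[i - 1], y[j - 1])])
--         T[0] = [c for c in T[1]]  # On veut eviter les effet de bords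
--
--     # On separe la boucle en deux pour eviter les tests et le stockage a chaque iteration.
--
--     for i in range(n // 2 + 1, n + 1):
--         T[1][0] = i * c_del
--         for j in range(1, m + 1):
--             # Calcul D(i,j)
--             val1 = T[1][j - 1] + c_ins
--             val2 = T[0][j] + c_del
--             val3 = T[0][j - 1] + cout_sub(x[i - 1], y[j - 1])
--             T[1][j] = min(val1, val2, val3)
--
--             # Passage de la colonne d'origine
--             if T[1][j] == val1:
--                 col[1][j] = col[1][j - 1]
--             if T[1][j] == val2:
--                 col[1][j] = col[0][j]
--             if T[1][j] == val3:
--                 col[1][j] = col[0][j - 1]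
--
--         T[0] = [c for c in T[1]]  #
--
--         col[0] = [c for c in col[1]]
--
--     return col[0][m]
-- ===== SOURCE B (Python) =====
-- c_del = 2
-- c_ins = 2
--
-- def cout_sub(a, b):
--     if a == b:
--         return 0
--     if (a == 'A' and b == 'T') or (a == 'T' and b == 'A') or (a == 'G' and b == 'C') or (a == 'C' and b == 'G'):
--         return 3
--     return 4
--
-- def coupure(x, y):
--     # Full DP table + backward traceback (ties: diagonal > up > left), instead of
--     # the original's two-row forward propagation of origin columns.
--     # Like the original, column 0 strictly below the mid row has no origin: -1.
--     n, m = len(x), len(y)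
--     D = [[j * c_ins for j in range(m + 1)]]
--     for i in range(1, n + 1):
--         prev = D[-1]
--         row = [i * c_del]
--         for j in range(1, m + 1):
--             row.append(min(row[j - 1] + c_ins, prev[j] + c_del,
--                            prev[j - 1] + cout_sub(x[i - 1], y[j - 1])))
--         D.append(row)
--     i, j = n, m
--     half = n // 2
--     while i > half:
--         if j == 0:
--             return -1
--         if D[i][j] == D[i - 1][j - 1] + cout_sub(x[i - 1], y[j - 1]):
--             i -= 1
--             j -= 1
--         elif D[i][j] == D[i - 1][j] + c_del:
--             i -= 1
--         else:
--             j -= 1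
--     return j
-- ===== Notes on version B (the rewrite author's own statement) =====
-- stated objective: alternative
-- what changed: Replaces A's linear-space two-row forward propagation of origin columns (with its in-row overwrite tie-breaking) by building the full DP cost matrix and recovering the cut column with a backward traceback from (n, m) that breaks ties diagonal > up > left and reports -1 when it reaches column 0 strictly above the mid row, exactly as A does.
import Mathlib
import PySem

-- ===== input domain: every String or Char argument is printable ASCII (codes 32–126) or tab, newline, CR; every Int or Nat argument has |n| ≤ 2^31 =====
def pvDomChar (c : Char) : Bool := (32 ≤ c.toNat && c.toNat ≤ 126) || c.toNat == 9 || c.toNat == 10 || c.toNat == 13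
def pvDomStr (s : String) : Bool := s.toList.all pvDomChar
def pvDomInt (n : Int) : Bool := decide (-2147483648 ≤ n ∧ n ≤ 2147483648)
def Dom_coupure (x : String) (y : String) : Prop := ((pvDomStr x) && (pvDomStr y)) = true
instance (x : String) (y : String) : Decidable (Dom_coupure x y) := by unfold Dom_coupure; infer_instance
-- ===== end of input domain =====

-- B replaces A's two-row forward propagation of origin columns by a full DP table plus a
-- backward traceback (objective: alternative decomposition; same costs, same tie-breaking,
-- including A's -1 answer for column 0 strictly below the mid row).

-- ===== PORT A =====
-- Transliteration of Source A. All list indices in the Python are nonnegative and in range,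
-- so Nat indexing with List.getD / List.set is exact here.
def c_del : Int := 2

def c_ins : Int := 2

def cout_sub (a : Char) (b : Char) : Int :=
  if a = b then 0
  else if (a = 'A' ∧ b = 'T') ∨ (a = 'T' ∧ b = 'A') ∨ (a = 'G' ∧ b = 'C') ∨ (a = 'C' ∧ b = 'G') then 3
  else 4

-- first loop body: row update of T[1] (phase 1, i = 1 .. n//2)
def rowA (xs ys : List Char) (T0 : List Int) (i : Nat) (m : Nat) (T1 : List Int) : List Int :=
  (List.range' 1 m).foldl (fun T1 j =>
      T1.set j (min (min (T1.getD (j-1) 0 + c_ins) (T0.getD j 0 + c_del))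
                    (T0.getD (j-1) 0 + cout_sub (xs.getD (i-1) ' ') (ys.getD (j-1) ' '))))
    (T1.set 0 ((i : Int) * c_del))

-- second loop inner body: update T[1][j] and the three sequential ifs on col[1][j]
def innerA (xs ys : List Char) (T0 col0 : List Int) (i : Nat)
    (p : List Int × List Int) (j : Nat) : List Int × List Int :=
  let val1 := p.1.getD (j-1) 0 + c_ins
  let val2 := T0.getD j 0 + c_del
  let val3 := T0.getD (j-1) 0 + cout_sub (xs.getD (i-1) ' ') (ys.getD (j-1) ' ')
  let t := min (min val1 val2) val3
  let T1 := p.1.set j t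
  let col1 := if t = val1 then p.2.set j (p.2.getD (j-1) 0) else p.2
  let col1 := if t = val2 then col1.set j (col0.getD j 0) else col1
  let col1 := if t = val3 then col1.set j (col0.getD (j-1) 0) else col1
  (T1, col1)

-- first loop body wrapper: compute the row, then T[0] := T[1]
def step1 (xs ys : List Char) (m : Nat) (q : List Int × List Int) (i : Nat) : List Int × List Int :=
  let T1 := rowA xs ys q.1 i m q.2
  (T1, T1)

-- second loop body (phase 2, i = n//2+1 .. n): one row, then T[0] := T[1], col[0] := col[1]
def stepA2 (xs ys : List Char) (m : Nat)
    (st : List Int × List Int × List Int × List Int) (i : Nat) :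
    List Int × List Int × List Int × List Int :=
  let p := (List.range' 1 m).foldl (innerA xs ys st.1 st.2.2.1 i)
             (st.2.1.set 0 ((i : Int) * c_del), st.2.2.2)
  (p.1, p.1, p.2, p.2)

def coupure (x : String) (y : String) : Int :=
  let xs := x.toList
  let ys := y.toList
  let n := xs.length
  let m := ys.length
  let T0 := (List.range (m+1)).map (fun j : Nat => (j : Int) * c_ins)
  let T1 := List.replicate (m+1) (-1 : Int)
  let col0 := (List.range (m+1)).map (fun j : Nat => (j : Int))
  let col1 := List.replicate (m+1) (-1 : Int)
  let q := (List.range' 1 (n/2)).foldl (step1 xs ys m) (T0, T1)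
  let st := (List.range' (n/2+1) (n - n/2)).foldl (stepA2 xs ys m) (q.1, q.2, col0, col1)
  st.2.2.1.getD m 0

-- ===== PORT B =====
-- Transliteration of Source B: build the full DP matrix, then trace back from (n, m).
def rowB (xs ys : List Char) (prev : List Int) (i : Nat) (m : Nat) : List Int :=
  (List.range' 1 m).foldl (fun row j =>
      row ++ [min (min (row.getD (j-1) 0 + c_ins) (prev.getD j 0 + c_del))
                  (prev.getD (j-1) 0 + cout_sub (xs.getD (i-1) ' ') (ys.getD (j-1) ' '))])
    [(i : Int) * c_del]

def buildD (xs ys : List Char) (n m : Nat) : List (List Int) :=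
  (List.range' 1 n).foldl (fun D i => D ++ [rowB xs ys (D.getLastD []) i m])
    [(List.range (m+1)).map (fun j : Nat => (j : Int) * c_ins)]

-- the while loop: i, j decrease, stop at the mid row (or report -1 at column 0)
def tb (xs ys : List Char) (D : List (List Int)) (half : Nat) (i j : Nat) : Int :=
  if _h1 : i ≤ half then (j : Int)
  else if _h2 : j = 0 then -1
  else if (D.getD i []).getD j 0
        = (D.getD (i-1) []).getD (j-1) 0 + cout_sub (xs.getD (i-1) ' ') (ys.getD (j-1) ' ') then
    tb xs ys D half (i-1) (j-1)
  else if (D.getD i []).getD j 0 = (D.getD (i-1) []).getD j 0 + c_del then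
    tb xs ys D half (i-1) j
  else
    tb xs ys D half i (j-1)
termination_by i + j
decreasing_by all_goals omega

def coupure_alt (x : String) (y : String) : Int :=
  let xs := x.toList
  let ys := y.toList
  let n := xs.length
  let m := ys.length
  tb xs ys (buildD xs ys n m) (n/2) n m

-- ===== PRECONDITION & SPEC =====
def Spec_coupure (x : String) (y : String) (out : Int) : Prop := out = coupure_alt x y
instance (x : String) (y : String) (out : Int) : Decidable (Spec_coupure x y out) := by unfold Spec_coupure; infer_instance

-- ===== CLAIM (what is proved, stated in full; the proofs are below) =====
def Claim_equal_coupure : Prop := ∀ (x : String) (y : String), Dom_coupure x y → Spec_coupure x y (coupure x y)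

-- ===== LEMMAS AND PROOFS =====

-- the mathematical DP value D(i, j)
def dp (xs ys : List Char) : Nat → Nat → Int
  | 0, j => (j : Int) * 2
  | i+1, 0 => ((i : Int) + 1) * 2
  | i+1, j+1 => min (min (dp xs ys (i+1) j + 2) (dp xs ys i (j+1) + 2))
                    (dp xs ys i j + cout_sub (xs.getD i ' ') (ys.getD j ' '))
termination_by i j => (i, j)

-- the origin column of cell (i, j), with A's tie order (diagonal beats up beats left)
-- and A's -1 for column 0 strictly below row `half`
def colA (xs ys : List Char) (half : Nat) (i j : Nat) : Int :=
  if _h1 : i ≤ half then (j : Int)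
  else if _h2 : j = 0 then -1
  else if dp xs ys i j = dp xs ys (i-1) (j-1) + cout_sub (xs.getD (i-1) ' ') (ys.getD (j-1) ' ') then
    colA xs ys half (i-1) (j-1)
  else if dp xs ys i j = dp xs ys (i-1) j + 2 then
    colA xs ys half (i-1) j
  else
    colA xs ys half i (j-1)
termination_by i + j
decreasing_by all_goals omega

def dpList (xs ys : List Char) (m i : Nat) : List Int :=
  (List.range (m+1)).map (fun j => dp xs ys i j)

def colList (xs ys : List Char) (half m i : Nat) : List Int :=
  (List.range (m+1)).map (fun j => colA xs ys half i j)

lemma getD_set (l : List Int) (n j : Nat) (v d : Int) (h : j < l.length) :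
    (l.set n v).getD j d = if n = j then v else l.getD j d := by
  rw [List.getD_eq_getElem?_getD, List.getD_eq_getElem?_getD, List.getElem?_set]
  split_ifs with h1 h2 <;> simp_all

lemma dp_zero_left (xs ys : List Char) (j : Nat) : dp xs ys 0 j = (j : Int) * 2 := by
  rw [dp]

lemma dp_zero_right (xs ys : List Char) (i : Nat) : dp xs ys i 0 = (i : Int) * 2 := by
  cases i with
  | zero => rw [dp]
  | succ i' => rw [dp]; push_cast; ring

lemma dp_succ_succ (xs ys : List Char) (i j : Nat) :
    dp xs ys (i+1) (j+1) = min (min (dp xs ys (i+1) j + 2) (dp xs ys i (j+1) + 2))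
                    (dp xs ys i j + cout_sub (xs.getD i ' ') (ys.getD j ' ')) := by
  rw [dp]

lemma colA_le (xs ys : List Char) (half i j : Nat) (h : i ≤ half) :
    colA xs ys half i j = (j : Int) := by
  rw [colA]; simp [h]

lemma colA_zero (xs ys : List Char) (half i : Nat) (h : half < i) :
    colA xs ys half i 0 = -1 := by
  rw [colA]; simp [Nat.not_le_of_lt h]

lemma colA_succ (xs ys : List Char) (half i j : Nat) (h : half < i + 1) :
    colA xs ys half (i+1) (j+1)
      = if dp xs ys (i+1) (j+1) = dp xs ys i j + cout_sub (xs.getD i ' ') (ys.getD j ' ') then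
          colA xs ys half i j
        else if dp xs ys (i+1) (j+1) = dp xs ys i (j+1) + 2 then
          colA xs ys half i (j+1)
        else
          colA xs ys half (i+1) j := by
  rw [colA]; simp [Nat.not_le_of_lt h]

lemma min3_cases (a b c : Int) : min (min a b) c = a ∨ min (min a b) c = b ∨ min (min a b) c = c := by
  rcases min_cases (min a b) c with ⟨h, _⟩ | ⟨h, _⟩
  · rcases min_cases a b with ⟨h2, _⟩ | ⟨h2, _⟩ <;> omega
  · omega

lemma dpList_length (xs ys : List Char) (m i : Nat) : (dpList xs ys m i).length = m + 1 := by
  simp [dpList]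

lemma dpList_getD (xs ys : List Char) (m i j : Nat) (h : j ≤ m) :
    (dpList xs ys m i).getD j 0 = dp xs ys i j := by
  exact PySem.List.getD_map_range _ _ _ _ (by omega)

lemma colList_getD (xs ys : List Char) (half m i j : Nat) (h : j ≤ m) :
    (colList xs ys half m i).getD j 0 = colA xs ys half i j := by
  exact PySem.List.getD_map_range _ _ _ _ (by omega)

-- ---- A side, phase 1 ----
lemma getD_set_ne (l : List Int) (n j : Nat) (v d : Int) (h : j < l.length) (hne : n ≠ j) :
    (l.set n v).getD j d = l.getD j d := by
  rw [getD_set l n j v d h, if_neg hne]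

lemma rowA_inv (xs ys : List Char) (m i' : Nat) (T1 : List Int) (hT1 : T1.length = m + 1) :
    ∀ k, k ≤ m →
      ((List.range' 1 k).foldl (fun T1 j =>
          T1.set j (min (min (T1.getD (j-1) 0 + c_ins) ((dpList xs ys m i').getD j 0 + c_del))
                        ((dpList xs ys m i').getD (j-1) 0 + cout_sub (xs.getD (i'+1-1) ' ') (ys.getD (j-1) ' '))))
        (T1.set 0 (((i'+1 : Nat) : Int) * c_del))).length = m + 1 ∧
      (∀ j, j ≤ k →
        ((List.range' 1 k).foldl (fun T1 j =>
          T1.set j (min (min (T1.getD (j-1) 0 + c_ins) ((dpList xs ys m i').getD j 0 + c_del))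
                        ((dpList xs ys m i').getD (j-1) 0 + cout_sub (xs.getD (i'+1-1) ' ') (ys.getD (j-1) ' '))))
        (T1.set 0 (((i'+1 : Nat) : Int) * c_del))).getD j 0 = dp xs ys (i'+1) j) := by
  intro k
  induction k with
  | zero =>
    intro _
    simp only [List.range'_zero, List.foldl_nil]
    refine ⟨by simp [hT1], ?_⟩
    intro j hj
    have hj0 : j = 0 := by omega
    subst hj0
    rw [getD_set T1 0 0 _ 0 (by omega), if_pos rfl, dp_zero_right]
    simp [c_del]
  | succ k ih =>
    intro hk
    obtain ⟨ihlen, ihval⟩ := ih (by omega)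
    rw [List.range'_1_concat, List.foldl_append]
    simp only [List.foldl_cons, List.foldl_nil]
    refine ⟨by rw [List.length_set]; exact ihlen, ?_⟩
    intro j hj
    rw [getD_set _ (1+k) j _ 0 (by rw [ihlen]; omega)]
    by_cases hjk : 1 + k = j
    · rw [if_pos hjk]
      have h1 : 1 + k - 1 = k := by omega
      have h3 : i' + 1 - 1 = i' := by omega
      rw [h1, ihval k le_rfl,
          dpList_getD xs ys m i' (1+k) (by omega), dpList_getD xs ys m i' k (by omega), h3]
      have h2 : 1 + k = k + 1 := by omega
      rw [← hjk, h2, dp_succ_succ]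
      simp [c_ins, c_del]
    · rw [if_neg hjk]
      exact ihval j (by omega)

lemma rowA_eq (xs ys : List Char) (m i' : Nat) (T1 : List Int) (hT1 : T1.length = m + 1) :
    rowA xs ys (dpList xs ys m i') (i'+1) m T1 = dpList xs ys m (i'+1) := by
  obtain ⟨hlen, hval⟩ := rowA_inv xs ys m i' T1 hT1 m le_rfl
  unfold rowA
  apply List.ext_getElem
  · rw [hlen, dpList_length]
  · intro j h1 h2
    rw [← List.getD_eq_getElem _ 0 h1, ← List.getD_eq_getElem _ 0 h2,
        dpList_getD xs ys m (i'+1) j (by rw [hlen] at h1; omega)]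
    exact hval j (by rw [hlen] at h1; omega)

lemma phase1_inv (xs ys : List Char) (m : Nat) :
    ∀ k,
      ((List.range' 1 k).foldl (step1 xs ys m)
        ((List.range (m+1)).map (fun j : Nat => (j : Int) * c_ins), List.replicate (m+1) (-1 : Int))).1
        = dpList xs ys m k ∧
      ((List.range' 1 k).foldl (step1 xs ys m)
        ((List.range (m+1)).map (fun j : Nat => (j : Int) * c_ins), List.replicate (m+1) (-1 : Int))).2.length
        = m + 1 := by
  intro k
  induction k with
  | zero =>
    constructor
    · simp only [List.range'_zero, List.foldl_nil]
      unfold dpList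
      exact List.map_congr_left (fun j _ => by rw [dp_zero_left]; simp [c_ins])
    · simp
  | succ k ih =>
    obtain ⟨ih1, ih2⟩ := ih
    rw [List.range'_1_concat, List.foldl_append]
    simp only [List.foldl_cons, List.foldl_nil, step1]
    rw [ih1]
    have h2 : 1 + k = k + 1 := by omega
    rw [h2, rowA_eq xs ys m k _ ih2]
    exact ⟨rfl, by rw [dpList_length]⟩

-- ---- A side, phase 2 ----
-- ---- A side, phase 2 ----
lemma ite_set_length (p : Prop) [Decidable p] (l : List Int) (J : Nat) (v : Int) :
    (if p then l.set J v else l).length = l.length := by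
  split_ifs <;> simp

lemma ite_set_getD_ne (p : Prop) [Decidable p] (l : List Int) (J j : Nat) (v d : Int)
    (h : j < l.length) (hne : J ≠ j) :
    (if p then l.set J v else l).getD j d = l.getD j d := by
  split_ifs with hp
  · exact getD_set_ne l J j v d h hne
  · rfl

lemma inner2_inv (xs ys : List Char) (m half i' : Nat) (hh : half < i' + 1)
    (T1 col1 : List Int) (hT1 : T1.length = m + 1) (hc1 : col1.length = m + 1)
    (hc10 : col1.getD 0 0 = -1) :
    ∀ k, k ≤ m →
      ((List.range' 1 k).foldl (innerA xs ys (dpList xs ys m i') (colList xs ys half m i') (i'+1)) (T1.set 0 (((i'+1 : Nat) : Int) * c_del), col1)).1.length = m + 1 ∧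
      (∀ j, j ≤ k → ((List.range' 1 k).foldl (innerA xs ys (dpList xs ys m i') (colList xs ys half m i') (i'+1)) (T1.set 0 (((i'+1 : Nat) : Int) * c_del), col1)).1.getD j 0 = dp xs ys (i'+1) j) ∧
      ((List.range' 1 k).foldl (innerA xs ys (dpList xs ys m i') (colList xs ys half m i') (i'+1)) (T1.set 0 (((i'+1 : Nat) : Int) * c_del), col1)).2.length = m + 1 ∧
      ((List.range' 1 k).foldl (innerA xs ys (dpList xs ys m i') (colList xs ys half m i') (i'+1)) (T1.set 0 (((i'+1 : Nat) : Int) * c_del), col1)).2.getD 0 0 = -1 ∧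
      (∀ j, 1 ≤ j → j ≤ k → ((List.range' 1 k).foldl (innerA xs ys (dpList xs ys m i') (colList xs ys half m i') (i'+1)) (T1.set 0 (((i'+1 : Nat) : Int) * c_del), col1)).2.getD j 0 = colA xs ys half (i'+1) j) := by
  intro k
  induction k with
  | zero =>
    intro _
    simp only [List.range'_zero, List.foldl_nil]
    refine ⟨by simp [hT1], ?_, hc1, hc10, by omega⟩
    intro j hj
    have hj0 : j = 0 := by omega
    subst hj0
    rw [getD_set T1 0 0 _ 0 (by omega), if_pos rfl, dp_zero_right]
    simp [c_del]
  | succ k ih =>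
    intro hk
    obtain ⟨l1, v1, l2, c0, v2⟩ := ih (by omega)
    rw [List.range'_1_concat, List.foldl_append]
    simp only [List.foldl_cons, List.foldl_nil, innerA]
    have h1 : 1 + k - 1 = k := by omega
    have h3 : i' + 1 - 1 = i' := by omega
    have hkk : 1 + k = k + 1 := by omega
    rw [h1, h3, hkk, v1 k le_rfl, dpList_getD xs ys m i' (k+1) (by omega),
        dpList_getD xs ys m i' k (by omega),
        colList_getD xs ys half m i' (k+1) (by omega),
        colList_getD xs ys half m i' k (by omega)]
    simp only [c_ins, c_del] at l1 v1 l2 c0 v2 ⊢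
    have hteq : min (min (dp xs ys (i'+1) k + 2) (dp xs ys i' (k+1) + 2))
        (dp xs ys i' k + cout_sub (xs.getD i' ' ') (ys.getD k ' ')) = dp xs ys (i'+1) (k+1) := by
      rw [dp_succ_succ]
    rw [hteq]
    refine ⟨?_, ?_, ?_, ?_, ?_⟩
    · rw [List.length_set]; exact l1
    · intro j hj
      rw [getD_set _ (k+1) j _ 0 (by rw [l1]; omega)]
      by_cases hjk : k + 1 = j
      · rw [if_pos hjk, hjk]
      · rw [if_neg hjk]
        exact v1 j (by omega)
    · rw [ite_set_length, ite_set_length, ite_set_length]; exact l2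
    · rw [ite_set_getD_ne _ _ _ _ _ _ (by rw [ite_set_length, ite_set_length, l2]; omega) (by omega),
          ite_set_getD_ne _ _ _ _ _ _ (by rw [ite_set_length, l2]; omega) (by omega),
          ite_set_getD_ne _ _ _ _ _ _ (by rw [l2]; omega) (by omega)]
      exact c0
    · intro j hj1 hj2
      by_cases hjk : j = k + 1
      · subst hjk
        rw [colA_succ xs ys half i' k hh]
        by_cases hr : dp xs ys (i'+1) (k+1) = dp xs ys i' k + cout_sub (xs.getD i' ' ') (ys.getD k ' ')
        · rw [if_pos hr, if_pos hr,
              getD_set _ (k+1) (k+1) _ 0 (by rw [ite_set_length, ite_set_length, l2]; omega),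
              if_pos rfl]
        · rw [if_neg hr, if_neg hr]
          by_cases hq : dp xs ys (i'+1) (k+1) = dp xs ys i' (k+1) + 2
          · rw [if_pos hq, if_pos hq,
                getD_set _ (k+1) (k+1) _ 0 (by rw [ite_set_length, l2]; omega),
                if_pos rfl]
          · rw [if_neg hq, if_neg hq]
            have hp : dp xs ys (i'+1) (k+1) = dp xs ys (i'+1) k + 2 := by
              rcases min3_cases (dp xs ys (i'+1) k + 2) (dp xs ys i' (k+1) + 2)
                (dp xs ys i' k + cout_sub (xs.getD i' ' ') (ys.getD k ' ')) with h | h | h <;>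
                rw [← dp_succ_succ] at h <;> omega
            rw [if_pos hp,
                getD_set _ (k+1) (k+1) _ 0 (by rw [l2]; omega), if_pos rfl]
            rcases Nat.eq_zero_or_pos k with hk0 | hk0
            · subst hk0
              rw [c0, colA_zero xs ys half (i'+1) (by omega)]
            · exact v2 k hk0 (by omega)
      · have hne : k + 1 ≠ j := fun h => hjk h.symm
        rw [ite_set_getD_ne _ _ _ _ _ _ (by rw [ite_set_length, ite_set_length, l2]; omega) hne,
            ite_set_getD_ne _ _ _ _ _ _ (by rw [ite_set_length, l2]; omega) hne,
            ite_set_getD_ne _ _ _ _ _ _ (by rw [l2]; omega) hne]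
        exact v2 j hj1 (by omega)

lemma stepA2_eq (xs ys : List Char) (m half i' : Nat) (hh : half < i' + 1)
    (T1 col1 : List Int) (hT1 : T1.length = m + 1) (hc1 : col1.length = m + 1)
    (hc10 : col1.getD 0 0 = -1) :
    stepA2 xs ys m (dpList xs ys m i', T1, colList xs ys half m i', col1) (i'+1)
      = (dpList xs ys m (i'+1), dpList xs ys m (i'+1),
         colList xs ys half m (i'+1), colList xs ys half m (i'+1)) := by
  obtain ⟨l1, v1, l2, c0, v2⟩ := inner2_inv xs ys m half i' hh T1 col1 hT1 hc1 hc10 m le_rfl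
  have hT : ((List.range' 1 m).foldl (innerA xs ys (dpList xs ys m i') (colList xs ys half m i') (i'+1)) (T1.set 0 (((i'+1 : Nat) : Int) * c_del), col1)).1 = dpList xs ys m (i'+1) := by
    apply List.ext_getElem
    · rw [l1, dpList_length]
    · intro j hj1 hj2
      rw [← List.getD_eq_getElem _ 0 hj1, ← List.getD_eq_getElem _ 0 hj2,
          dpList_getD xs ys m (i'+1) j (by rw [l1] at hj1; omega)]
      exact v1 j (by rw [l1] at hj1; omega)
  have hC : ((List.range' 1 m).foldl (innerA xs ys (dpList xs ys m i') (colList xs ys half m i') (i'+1)) (T1.set 0 (((i'+1 : Nat) : Int) * c_del), col1)).2 = colList xs ys half m (i'+1) := by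
    apply List.ext_getElem
    · rw [l2]; simp [colList]
    · intro j hj1 hj2
      rw [← List.getD_eq_getElem _ 0 hj1, ← List.getD_eq_getElem _ 0 hj2,
          colList_getD xs ys half m (i'+1) j (by rw [l2] at hj1; omega)]
      rcases Nat.eq_zero_or_pos j with h0 | h0
      · subst h0
        rw [c0, colA_zero xs ys half (i'+1) (by omega)]
      · exact v2 j h0 (by rw [l2] at hj1; omega)
  unfold stepA2
  dsimp only
  rw [hT, hC]

lemma phase2_inv (xs ys : List Char) (m half : Nat) (T1 : List Int) (hT1 : T1.length = m + 1) :
    ∀ k, 1 ≤ k →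
      (List.range' (half+1) k).foldl (stepA2 xs ys m)
        (dpList xs ys m half, T1, (List.range (m+1)).map (fun j : Nat => (j : Int)), List.replicate (m+1) (-1 : Int))
      = (dpList xs ys m (half+k), dpList xs ys m (half+k),
         colList xs ys half m (half+k), colList xs ys half m (half+k)) := by
  have hcol0 : (List.range (m+1)).map (fun j : Nat => (j : Int)) = colList xs ys half m half := by
    unfold colList
    exact List.map_congr_left (fun j _ => (colA_le xs ys half half j le_rfl).symm)
  intro k hk
  induction k, hk using Nat.le_induction with
  | base =>
    rw [List.range'_one]
    simp only [List.foldl_cons, List.foldl_nil]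
    rw [hcol0]
    rw [stepA2_eq xs ys m half half (by omega) T1 _ hT1 (by simp) (by simp)]
  | succ k hk ih =>
    rw [List.range'_1_concat, List.foldl_append, ih]
    simp only [List.foldl_cons, List.foldl_nil]
    have hidx : half + 1 + k = (half + k) + 1 := by omega
    rw [hidx, stepA2_eq xs ys m half (half + k) (by omega) _ _ (dpList_length xs ys m (half+k))
          (by simp [colList])
          (by rw [colList_getD xs ys half m (half+k) 0 (by omega),
                  colA_zero xs ys half (half+k) (by omega)])]
    rfl

-- ---- B side ----
-- ---- B side ----
lemma rowB_inv (xs ys : List Char) (m i' : Nat) :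
    ∀ k, k ≤ m →
      (List.range' 1 k).foldl (fun row j =>
          row ++ [min (min (row.getD (j-1) 0 + c_ins) ((dpList xs ys m i').getD j 0 + c_del))
                      ((dpList xs ys m i').getD (j-1) 0 + cout_sub (xs.getD (i'+1-1) ' ') (ys.getD (j-1) ' '))])
        [((i'+1 : Nat) : Int) * c_del]
      = (List.range (k+1)).map (fun j => dp xs ys (i'+1) j) := by
  intro k
  induction k with
  | zero =>
    intro _
    simp [dp_zero_right, c_del]
  | succ k ih =>
    intro hk
    rw [List.range'_1_concat, List.foldl_append, ih (by omega)]
    simp only [List.foldl_cons, List.foldl_nil]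
    have h1 : (1 + k) - 1 = k := by omega
    have h2 : 1 + k = k + 1 := by omega
    rw [h1, h2]
    rw [PySem.List.getD_map_range _ _ _ _ (by omega),
        dpList_getD xs ys m i' (k+1) (by omega), dpList_getD xs ys m i' k (by omega)]
    have h3 : i' + 1 - 1 = i' := by omega
    rw [h3]
    have : (List.range (k+1+1)).map (fun j => dp xs ys (i'+1) j)
        = (List.range (k+1)).map (fun j => dp xs ys (i'+1) j) ++ [dp xs ys (i'+1) (k+1)] := by
      rw [List.range_succ, List.map_append]; rfl
    rw [this, dp_succ_succ]
    simp [c_ins, c_del]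

lemma rowB_eq (xs ys : List Char) (m i' : Nat) :
    rowB xs ys (dpList xs ys m i') (i'+1) m = dpList xs ys m (i'+1) := by
  unfold rowB dpList
  exact rowB_inv xs ys m i' m le_rfl

lemma buildD_eq (xs ys : List Char) (m : Nat) :
    ∀ n, buildD xs ys n m = (List.range (n+1)).map (fun i => dpList xs ys m i) := by
  intro n
  unfold buildD
  induction n with
  | zero =>
    simp only [List.range'_zero, List.foldl_nil]
    unfold dpList
    congr 1
    exact List.map_congr_left (fun j _ => by rw [dp_zero_left]; simp [c_ins])
  | succ n ih =>
    rw [List.range'_1_concat, List.foldl_append, ih]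
    simp only [List.foldl_cons, List.foldl_nil]
    have hlast : ((List.range (n+1)).map (fun i => dpList xs ys m i)).getLastD [] = dpList xs ys m n := by
      rw [List.range_succ, List.map_append]
      simp
    rw [hlast]
    have h2 : 1 + n = n + 1 := by omega
    rw [h2, rowB_eq]
    rw [List.range_succ (n := n+1), List.map_append]
    rfl

lemma buildD_getD (xs ys : List Char) (n m i j : Nat) (hi : i ≤ n) (hj : j ≤ m) :
    ((buildD xs ys n m).getD i []).getD j 0 = dp xs ys i j := by
  rw [buildD_eq, PySem.List.getD_map_range _ _ _ _ (by omega), dpList_getD xs ys m i j hj]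

lemma tb_eq_colA (xs ys : List Char) (n m half : Nat) :
    ∀ N i j, i + j ≤ N → i ≤ n → j ≤ m →
      tb xs ys (buildD xs ys n m) half i j = colA xs ys half i j := by
  intro N
  induction N with
  | zero =>
    intro i j hN _ _
    have hi0 : i = 0 := by omega
    have hj0 : j = 0 := by omega
    subst hi0; subst hj0
    rw [tb, colA]
    simp
  | succ N ih =>
    intro i j hN hi hj
    rw [tb, colA]
    by_cases h1 : i ≤ half
    · simp [h1]
    · simp only [dif_neg h1]
      by_cases h2 : j = 0
      · simp [h2]
      · simp only [dif_neg h2]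
        rw [buildD_getD xs ys n m i j hi hj,
            buildD_getD xs ys n m (i-1) (j-1) (by omega) (by omega),
            buildD_getD xs ys n m (i-1) j (by omega) hj]
        simp only [c_del]
        split_ifs with h3 h4
        · exact ih (i-1) (j-1) (by omega) (by omega) (by omega)
        · exact ih (i-1) j (by omega) (by omega) hj
        · exact ih i (j-1) (by omega) hi (by omega)

-- ---- assembly ----
lemma coupure_eq_colA (x y : String) :
    coupure x y = colA x.toList y.toList (x.toList.length / 2) x.toList.length y.toList.length := by
  unfold coupure
  dsimp only
  rcases Nat.eq_zero_or_pos (x.toList.length) with hn | hn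
  · rw [hn]
    norm_num
    rw [colA_le _ _ _ _ _ le_rfl]
  · obtain ⟨h1, h2⟩ := phase1_inv x.toList y.toList y.toList.length (x.toList.length / 2)
    rw [h1]
    rw [phase2_inv x.toList y.toList y.toList.length (x.toList.length / 2) _ h2
          (x.toList.length - x.toList.length / 2) (by omega)]
    dsimp only
    have hsum : x.toList.length / 2 + (x.toList.length - x.toList.length / 2) = x.toList.length := by
      omega
    rw [hsum, colList_getD _ _ _ _ _ _ le_rfl]

lemma coupure_alt_eq_colA (x y : String) :
    coupure_alt x y = colA x.toList y.toList (x.toList.length / 2) x.toList.length y.toList.length := by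
  unfold coupure_alt
  exact tb_eq_colA _ _ _ _ _ _ _ _ le_rfl le_rfl le_rfl

-- ===== VERDICT (by name: the statement is the Claim_ definition above) =====
theorem coupure_spec : Claim_equal_coupure := by
  intro x y _
  unfold Spec_coupure
  rw [coupure_eq_colA, coupure_alt_eq_colA]
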